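-- pv_equiv track=rewrite | github.com/JernejHabjan/School | FRI/Programing/Python/1Letnik/Other/Poljubne vaje/Priprava na izpit/izpit 22.jan 2014.py | skrij
-- ===== SOURCE A (Python) =====
-- from collections import defaultdict
--
-- def skrij(beseda):
--     slovar = defaultdict(int)
--     a = sorted(beseda)
--     seznam = []
--     nov_sez = []
--     for x in a:
--         slovar[x] += 1
--     for key, value in slovar.items():
--         seznam.append((key, value))
--
--     for x in sorted(seznam):
--         nov_sez.append(x[0])
--         nov_sez.append(str(x[1]))
--     return "".join(nov_sez)
-- ===== SOURCE B (Python) =====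
-- def skrij(beseda):
--     def rle(xs):
--         # run-length encode a sorted list: leading run of xs[0], then recurse
--         if not xs:
--             return []
--         z = xs[0]
--         k = 1
--         while k < len(xs) and xs[k] == z:
--             k += 1
--         return [z, str(k)] + rle(xs[k:])
--     return "".join(rle(sorted(beseda)))
-- ===== Notes on version B (the rewrite author's own statement) =====
-- stated objective: alternative
-- what changed: B sorts the word once and run-length encodes the sorted list in a single recursive pass (emit the leading run's character and length, recurse on the remainder), instead of A's defaultdict frequency table, rebuilt item list and second sort.
import Mathlib
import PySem

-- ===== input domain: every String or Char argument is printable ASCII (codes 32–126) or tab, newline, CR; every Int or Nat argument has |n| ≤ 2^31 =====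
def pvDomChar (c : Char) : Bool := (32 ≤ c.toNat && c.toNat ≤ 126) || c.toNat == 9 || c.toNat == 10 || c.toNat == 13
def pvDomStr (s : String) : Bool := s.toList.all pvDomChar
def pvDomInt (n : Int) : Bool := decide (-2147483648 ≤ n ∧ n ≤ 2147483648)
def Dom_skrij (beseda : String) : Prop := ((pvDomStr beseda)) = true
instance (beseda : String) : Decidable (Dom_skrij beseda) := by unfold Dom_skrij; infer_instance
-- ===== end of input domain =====

-- B replaces A's defaultdict frequency table + item list + second sort by a single
-- run-length-encoding pass over the once-sorted character list (alternative, not faster).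

-- ===== PORT A =====
-- Python iterates a string as 1-character strings; they are modeled as Char (joined as String.ofList [c]).
def skrij (beseda : String) : String :=
  let a := PySem.List.sorted beseda.toList (fun x => x) false
  let slovar := a.foldl (fun d x => d.modify x 0 (· + 1)) (PySem.Dict.empty : PySem.Dict Char Int)
  let seznam := slovar.items.foldl (fun acc p => acc ++ [p]) []
  let nov_sez := (PySem.List.sorted2 seznam Prod.fst Prod.snd false).foldl
    (fun acc x => acc ++ [String.ofList [x.1], PySem.Int.toStr x.2]) []
  PySem.Str.join "" nov_sez

-- ===== PORT B =====
-- rle: the inner while loop counting the leading run becomes takeWhile/dropWhile on the tail.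
def skrijRle (xs : List Char) : List String :=
  match xs with
  | [] => []
  | z :: rest =>
      let k : Nat := 1 + (rest.takeWhile (fun c => c == z)).length
      [String.ofList [z], PySem.Int.toStr (k : Int)] ++ skrijRle (rest.dropWhile (fun c => c == z))
termination_by xs.length
decreasing_by
  simpa using Nat.lt_succ_of_le (List.length_dropWhile_le _ rest)

def skrij_alt (beseda : String) : String :=
  PySem.Str.join "" (skrijRle (PySem.List.sorted beseda.toList (fun x => x) false))

-- ===== PRECONDITION & SPEC =====
def Spec_skrij (beseda : String) (out : String) : Prop := out = skrij_alt beseda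
instance (beseda : String) (out : String) : Decidable (Spec_skrij beseda out) := by unfold Spec_skrij; infer_instance

-- ===== CLAIM (what is proved, stated in full; the proofs are below) =====
def Claim_equal_skrij : Prop := ∀ (beseda : String), Dom_skrij beseda → Spec_skrij beseda (skrij beseda)

-- ===== LEMMAS AND PROOFS =====

-- a fold of insertBy over a list already in 'before'-order appends it unchanged
theorem foldl_insertBy_eq_append {α : Type} (before : α → α → Bool) :
    ∀ (xs acc : List α), (∀ x ∈ xs, ∀ y ∈ acc, before x y = false) →
    xs.Pairwise (fun a b => before b a = false) →
    xs.foldl (fun acc x => PySem.List.insertBy before x acc) acc = acc ++ xs := by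
  intro xs
  induction xs with
  | nil => intro acc _ _; simp
  | cons x t ih =>
    intro acc hxa hp
    have hx : PySem.List.insertBy before x acc = acc ++ [x] :=
      PySem.List.insertBy_of_forall_not_before _ _ _ (hxa x (by simp))
    simp only [List.foldl_cons, hx]
    rw [ih (acc ++ [x])]
    · simp
    · intro z hz y hy
      rcases List.mem_append.1 hy with hy | hy
      · exact hxa z (by simp [hz]) y hy
      · have := (List.pairwise_cons.1 hp).1 z hz
        simpa [List.mem_singleton.1 hy]
    · exact (List.pairwise_cons.1 hp).2

-- sorted2 of a list with strictly increasing first key is the list itself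
theorem sorted2_eq_self {α κ₁ κ₂ : Type} [LinearOrder κ₁] [LinearOrder κ₂]
    (xs : List α) (k1 : α → κ₁) (k2 : α → κ₂)
    (h : xs.Pairwise (fun a b => k1 a < k1 b)) :
    PySem.List.sorted2 xs k1 k2 false = xs := by
  unfold PySem.List.sorted2
  simp only [if_neg (by decide : ¬ (false = true))]
  have := foldl_insertBy_eq_append
    (fun a b => decide (k1 a < k1 b) || (!decide (k1 b < k1 a) && decide (k2 a < k2 b)))
    xs [] (by simp)
    (h.imp (by intro a b hab; simp [not_lt.2 (le_of_lt hab), hab]))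
  simpa using this

-- Set.ofList is a sublist of its argument
theorem ofList_sublist {α : Type} [BEq α] [LawfulBEq α] :
    ∀ (xs : List α), (PySem.Set.ofList xs).Sublist xs := by
  intro xs
  induction xs with
  | nil => simp [PySem.Set.ofList_nil]
  | cons x t ih =>
    rw [PySem.Set.ofList_cons]
    exact List.Sublist.cons₂ x (List.filter_sublist.trans ih)

-- deduplicating a sorted list gives a strictly increasing list
theorem ofList_sorted_pairwise_lt {α : Type} [BEq α] [LawfulBEq α] [LinearOrder α]
    (l : List α) :
    (PySem.Set.ofList (PySem.List.sorted l (fun x => x) false)).Pairwise (· < ·) := by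
  have hle : (PySem.Set.ofList (PySem.List.sorted l (fun x => x) false)).Pairwise (· ≤ ·) :=
    ((PySem.List.sorted_pairwise l (fun x => x)).sublist (ofList_sublist _))
  have hnd := PySem.Set.nodup_ofList (PySem.List.sorted l (fun x => x) false)
  exact (hle.and hnd).imp (fun h => lt_of_le_of_ne h.1 h.2)

-- flatMap is determined by the function's values on members
theorem flatMap_congr_mem {α β : Type} :
    ∀ (s : List α) (f g : α → List β), (∀ c ∈ s, f c = g c) → s.flatMap f = s.flatMap g := by
  intro s
  induction s with
  | nil => intro f g _; rfl
  | cons x t ih =>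
    intro f g h
    simp only [List.flatMap_cons, h x (by simp), ih f g (fun c hc => h c (by simp [hc]))]

-- discarding an element of a deduplicated list = deduplicating the filtered list
theorem ofList_discard {α : Type} [BEq α] [LawfulBEq α] :
    ∀ (xs : List α) (z : α),
    PySem.Set.discard (PySem.Set.ofList xs) z = PySem.Set.ofList (xs.filter (fun y => !(y == z))) := by
  intro xs
  induction xs with
  | nil => intro z; simp [PySem.Set.ofList_nil, PySem.Set.discard]
  | cons x t ih =>
    intro z
    by_cases hxz : x = z
    · subst hxz
      rw [PySem.Set.ofList_cons, List.filter_cons_of_neg (by simp)]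
      simp only [PySem.Set.discard] at ih ⊢
      rw [List.filter_cons_of_neg (by simp), List.filter_filter]
      rw [show (fun y => !(y == x) && !(y == x)) = (fun y => !(y == x)) by
        funext y; cases y == x <;> simp]
      exact ih x
    · have hb : (!(x == z)) = true := by simp [hxz]
      rw [PySem.Set.ofList_cons,
        List.filter_cons_of_pos (p := fun y => !(y == z)) hb,
        PySem.Set.ofList_cons]
      simp only [PySem.Set.discard] at ih ⊢
      rw [List.filter_cons_of_pos (p := fun y => !(y == z)) hb,
        ← ih z, List.filter_filter, List.filter_filter]
      rw [show (fun a => !(a == z) && !(a == x)) = (fun a => !(a == x) && !(a == z)) from by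
        funext y; cases y == x <;> cases y == z <;> simp]

-- elements surviving the leading-run drop of a sorted list are ≠ the run's character
theorem ne_of_mem_dropWhile (z : Char) :
    ∀ (rest : List Char), (∀ e ∈ rest, z ≤ e) → rest.Pairwise (· ≤ ·) →
    ∀ e ∈ rest.dropWhile (fun c => c == z), e ≠ z := by
  intro rest
  induction rest with
  | nil => intro _ _ e he; simp [List.dropWhile] at he
  | cons r t ih =>
    intro hge hp e he
    rw [List.dropWhile_cons] at he
    by_cases hrz : r = z
    · rw [if_pos (by simp [hrz])] at he
      exact ih (fun x hx => hge x (by simp [hx])) (List.pairwise_cons.1 hp).2 e he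
    · rw [if_neg (by simp [hrz])] at he
      rcases List.mem_cons.1 he with rfl | he
      · exact hrz
      · have h1 : z < r := lt_of_le_of_ne (hge r (by simp)) (Ne.symm hrz)
        have h2 : r ≤ e := (List.pairwise_cons.1 hp).1 e he
        exact fun h => absurd (h ▸ h2) (not_le.2 h1)

-- run-length encoding of a sorted list = sorted distinct chars each with its count
theorem skrijRle_eq :
    ∀ (n : Nat) (a : List Char), a.length ≤ n → a.Pairwise (· ≤ ·) →
    skrijRle a = (PySem.Set.ofList a).flatMap
      (fun c => [String.ofList [c], PySem.Int.toStr ((a.count c : Nat) : Int)]) := by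
  intro n
  induction n with
  | zero =>
    intro a ha _
    have h0 : a = [] := List.eq_nil_of_length_eq_zero (Nat.le_zero.1 ha)
    subst h0; simp [skrijRle, PySem.Set.ofList_nil]
  | succ m ih =>
    intro a ha hp
    match a with
    | [] => simp [skrijRle, PySem.Set.ofList_nil]
    | z :: rest =>
      have hge : ∀ e ∈ rest, z ≤ e := (List.pairwise_cons.1 hp).1
      have hpr : rest.Pairwise (· ≤ ·) := (List.pairwise_cons.1 hp).2
      set run := rest.takeWhile (fun c => c == z) with hrun
      set rest' := rest.dropWhile (fun c => c == z) with hrest'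
      have hsplit : run ++ rest' = rest := List.takeWhile_append_dropWhile
      have hrunz : ∀ c ∈ run, c = z := fun c hc => by
        simpa using List.mem_takeWhile_imp hc
      have hne : ∀ e ∈ rest', e ≠ z := ne_of_mem_dropWhile z rest hge hpr
      -- unfold one step of skrijRle
      rw [skrijRle]
      -- the deduplicated list decomposes
      have hofl : PySem.Set.ofList (z :: rest) = z :: PySem.Set.ofList rest' := by
        rw [PySem.Set.ofList_cons, ofList_discard]
        congr 1
        rw [← hsplit, List.filter_append]
        rw [List.filter_eq_nil_iff.2 (fun c hc => by simp [hrunz c hc]),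
            List.filter_eq_self.2 (fun c hc => by simp [hne c hc])]
        simp
      rw [hofl, List.flatMap_cons]
      -- the count of z is the run length
      have hcz : (z :: rest).count z = 1 + run.length := by
        rw [← hsplit, List.count_cons, List.count_append]
        rw [List.count_eq_length.2 (fun b hb => (hrunz b hb).symm),
            List.count_eq_zero.2 (fun h => hne z h rfl)]
        simp [Nat.add_comm]
      -- counts of surviving characters are unaffected by z and its run
      have hpr' : rest'.Pairwise (· ≤ ·) := hpr.sublist (List.dropWhile_sublist _)
      have hlen : rest'.length ≤ m := by
        rw [hrest']
        have h1 := List.length_dropWhile_le (fun c => c == z) rest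
        simp only [List.length_cons] at ha
        omega
      rw [ih rest' hlen hpr']
      rw [flatMap_congr_mem (PySem.Set.ofList rest')
        (fun c => [String.ofList [c], PySem.Int.toStr ((rest'.count c : Nat) : Int)])
        (fun c => [String.ofList [c], PySem.Int.toStr (((z :: rest).count c : Nat) : Int)])
        (by
          intro c hc
          have hc' : c ∈ rest' := (PySem.Set.mem_ofList _ _).1 hc
          have hcne : c ≠ z := hne c hc'
          have : (z :: rest).count c = rest'.count c := by
            rw [← hsplit, List.count_cons, List.count_append]
            rw [List.count_eq_zero.2 (fun h => hcne (hrunz c h))]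
            simp [Ne.symm hcne, beq_iff_eq]
          simp only [this])]
      simp only [hcz, ← hrun]

-- ===== VERDICT (by name: the statement is the Claim_ definition above) =====
theorem skrij_spec : Claim_equal_skrij := by
  intro beseda _
  unfold Spec_skrij skrij skrij_alt
  dsimp only
  set l := beseda.toList with hl
  set a := PySem.List.sorted l (fun x => x) false with ha
  -- A's dict is Counter(a); its item list is the fold of appends
  have hdict : a.foldl (fun d x => d.modify x 0 (· + 1)) (PySem.Dict.empty : PySem.Dict Char Int)
      = PySem.Dict.counter a := (PySem.Dict.counter_eq_foldl a).symm
  rw [hdict]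
  rw [show ((PySem.Dict.counter a).items.foldl (fun acc p => acc ++ [p]) []
        = (PySem.Dict.counter a).items) by
    simpa using PySem.List.foldl_append_singleton_eq_map id (PySem.Dict.counter a).items []]
  rw [PySem.Dict.items_counter]
  -- the item list has strictly increasing keys, so the second sort is the identity
  rw [sorted2_eq_self _ Prod.fst Prod.snd (by
    refine List.Pairwise.map _ ?_ (ofList_sorted_pairwise_lt l)
    intro x y hxy; simpa using hxy)]
  rw [PySem.List.foldl_append_eq_flatMap, List.flatMap_map]
  rw [skrijRle_eq a.length a (le_refl _) (by simpa using PySem.List.sorted_pairwise l (fun x => x))]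
  rfl
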